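-- pv_equiv track=rewrite | github.com/ElouanR/Advent-Of-Code-2023 | Day 07/Part 2/main.py | is_oneP
-- ===== SOURCE A (Python) =====
-- def is_oneP(line):
--     char_counts = {}
--     joker_count = line.count('J')
--
--     for char in line:
--         if char != 'J':
--             if char in char_counts:
--                 char_counts[char] += 1
--             else:
--                 char_counts[char] = 1
--
--     for char in char_counts:
--         if char_counts[char] == 1 and joker_count > 0:
--             char_counts[char] += 1
--             joker_count -= 1
--
--     result = list(char_counts.values()).count(2) == 1 and list(char_counts.values()).count(1) == 3
--
--     return result
-- ===== SOURCE B (Python) =====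
-- def is_oneP(line):
--     cards = [c for c in line if c != 'J']
--     jokers = len(line) - len(cards)
--     singles = pairs = 0
--     while cards:
--         c = cards[0]
--         k = cards.count(c)
--         if k == 1:
--             singles += 1
--         elif k == 2:
--             pairs += 1
--         cards = [x for x in cards if x != c]
--     return (jokers, pairs, singles) in ((0, 1, 3), (1, 0, 4))
-- ===== Notes on version B (the rewrite author's own statement) =====
-- stated objective: alternative
-- what changed: Replaces A's frequency dict and its joker-promotion mutation loop by repeated extraction of one character class at a time from a plain list (no dict at all), and replaces the promote-then-test step by the derived closed classification (jokers,pairs,singles) in {(0,1,3),(1,0,4)}, which is provably the only way A's final test can hold.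
import Mathlib
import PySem

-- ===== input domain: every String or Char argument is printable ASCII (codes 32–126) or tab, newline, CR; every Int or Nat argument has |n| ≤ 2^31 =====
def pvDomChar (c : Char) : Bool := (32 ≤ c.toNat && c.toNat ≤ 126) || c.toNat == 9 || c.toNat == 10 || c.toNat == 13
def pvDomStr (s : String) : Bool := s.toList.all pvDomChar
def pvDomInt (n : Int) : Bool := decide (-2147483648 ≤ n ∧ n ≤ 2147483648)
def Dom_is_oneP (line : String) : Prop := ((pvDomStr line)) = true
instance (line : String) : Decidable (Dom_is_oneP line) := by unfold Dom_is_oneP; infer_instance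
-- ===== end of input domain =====

-- B replaces A's frequency dict and joker-promotion mutation loop by repeated extraction of
-- one character class at a time from a plain list and the derived closed classification
-- (jokers, pairs, singles) ∈ {(0,1,3), (1,0,4)}; objective: alternative.

-- ===== PORT A =====
-- the body of A's second loop, `for char in char_counts: ...` (state = (char_counts, joker_count))
def pvStepA (st : PySem.Dict Char Int × Int) (c : Char) : PySem.Dict Char Int × Int :=
  if st.1.getD c 0 = 1 ∧ st.2 > 0 then (st.1.insert c (st.1.getD c 0 + 1), st.2 - 1) else st

def is_oneP (line : String) : Bool :=
  let jokerCount : Int := (PySem.Str.count line "J" : Int)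
  -- for char in line: if char != 'J': char_counts[char] = char_counts[char] + 1 / 1
  let charCounts : PySem.Dict Char Int :=
    line.toList.foldl (fun d c =>
      if c ≠ 'J' then
        (if d.contains c then d.insert c (d.getD c 0 + 1) else d.insert c 1)
      else d) PySem.Dict.empty
  let st := charCounts.keys.foldl pvStepA (charCounts, jokerCount)
  (st.1.values.count 2 == 1) && (st.1.values.count 1 == 3)

-- ===== PORT B =====
-- the `while cards:` loop of Source B: extract the class of cards[0], tally it, recurse on the rest
def pvTallyB (cards : List Char) : Int × Int :=
  match cards with
  | [] => (0, 0)
  | c :: rest =>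
      let k := (c :: rest).count c
      let t := pvTallyB ((c :: rest).filter (fun x => x ≠ c))
      if k = 1 then (t.1 + 1, t.2) else if k = 2 then (t.1, t.2 + 1) else t
termination_by cards.length
decreasing_by
  have h := List.length_filter_le (fun x => !decide (x = c)) rest
  simp only [ne_eq, List.filter_cons, decide_not, decide_true, Bool.not_true,
    Bool.false_eq_true, if_false, List.length_cons]
  omega

def is_oneP_alt (line : String) : Bool :=
  let cards := line.toList.filter (fun c => c ≠ 'J')
  let jokers : Int := PySem.Str.len line - (cards.length : Int)
  let t := pvTallyB cards
  ((jokers, t.2, t.1) == ((0 : Int), (1 : Int), (3 : Int)))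
    || ((jokers, t.2, t.1) == ((1 : Int), (0 : Int), (4 : Int)))

-- ===== PRECONDITION & SPEC =====
def Spec_is_oneP (line : String) (out : Bool) : Prop := out = is_oneP_alt line
instance (line : String) (out : Bool) : Decidable (Spec_is_oneP line out) := by unfold Spec_is_oneP; infer_instance

-- ===== CLAIM (what is proved, stated in full; the proofs are below) =====
def Claim_equal_is_oneP : Prop := ∀ (line : String), Dom_is_oneP line → Spec_is_oneP line (is_oneP line)

-- ===== LEMMAS AND PROOFS =====

-- str.count with a single-character needle is plain character counting
theorem pv_count_go_single (c : Char) :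
    ∀ (fuel : Nat) (l : List Char) (acc : Nat), l.length ≤ fuel →
      PySem.Chars.count.go [c] fuel l acc = acc + l.count c := by
  intro fuel
  induction fuel with
  | zero =>
      intro l acc h
      have : l = [] := List.eq_nil_of_length_eq_zero (Nat.le_zero.mp h)
      subst this; simp [PySem.Chars.count.go]
  | succ n ih =>
      intro l acc h
      cases l with
      | nil => simp [PySem.Chars.count.go]
      | cons hd t =>
          simp only [PySem.Chars.count.go, List.isPrefixOf, List.isPrefixOf_nil_left,
            Bool.and_true]
          by_cases hc : c = hd
          · subst hc
            simp only [BEq.rfl, if_pos]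
            rw [List.length_cons] at h
            rw [ih _ _ (by simpa using h)]
            simp [List.count_cons]
            omega
          · have : (c == hd) = false := by simp [hc]
            rw [this]
            simp only [Bool.false_eq_true, if_neg, not_false_iff]
            rw [List.length_cons] at h
            rw [ih _ _ (by omega)]
            simp [List.count_cons, Ne.symm hc]

theorem pv_strcount_single (s : String) (c : Char) :
    PySem.Str.count s (String.mk [c]) = s.toList.count c := by
  rw [PySem.Str.count_eq]
  have hl : (String.mk [c]).toList = [c] := Eq.symm (String.ofList_eq.mp rfl)
  rw [hl, PySem.Chars.count]
  simp only [List.isEmpty_cons, if_neg, Bool.false_eq_true, not_false_iff]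
  simpa using pv_count_go_single c s.toList.length s.toList 0 le_rfl

-- countP over a Nodup key list after an insert at an existing key: stated addition-only
theorem pv_countP_insert (d : PySem.Dict Char Int) (K : List Char) (c : Char) (v q : Int)
    (hnd : K.Nodup) (hc : c ∈ K) :
    K.countP (fun x => (d.insert c v).getD x 0 == q) + (if d.getD c 0 == q then 1 else 0)
      = K.countP (fun x => d.getD x 0 == q) + (if v == q then 1 else 0) := by
  have hperm := List.perm_cons_erase hc
  rw [hperm.countP_eq (fun x => (d.insert c v).getD x 0 == q),
      hperm.countP_eq (fun x => d.getD x 0 == q)]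
  simp only [List.countP_cons]
  have hcong : (K.erase c).countP (fun x => (d.insert c v).getD x 0 == q)
      = (K.erase c).countP (fun x => d.getD x 0 == q) := by
    refine List.countP_congr ?_
    intro x hx
    have hxc : x ≠ c := (List.Nodup.mem_erase_iff hnd |>.mp hx).1
    rw [PySem.Dict.getD_insert_of_ne _ _ _ hxc]
  rw [hcong, PySem.Dict.getD_insert_self]
  by_cases h1 : d.getD c 0 == q <;> by_cases h2 : v == q <;> simp [h1, h2] <;> omega

-- the promotion loop: it turns min(jokers, singles-among-remaining-keys) values 1 into 2
theorem pv_loopA (ks : List Char) :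
    ∀ (d : PySem.Dict Char Int) (j : Int), ks.Nodup → d.keys.Nodup →
      (∀ c ∈ ks, d.contains c = true) → 0 ≤ j →
      (ks.foldl pvStepA (d, j)).1.keys = d.keys ∧
      (ks.foldl pvStepA (d, j)).1.keys.countP (fun c => (ks.foldl pvStepA (d, j)).1.getD c 0 == 2)
        = d.keys.countP (fun c => d.getD c 0 == 2)
          + min j.toNat (ks.countP (fun c => d.getD c 0 == 1)) ∧
      (ks.foldl pvStepA (d, j)).1.keys.countP (fun c => (ks.foldl pvStepA (d, j)).1.getD c 0 == 1)
        = d.keys.countP (fun c => d.getD c 0 == 1)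
          - min j.toNat (ks.countP (fun c => d.getD c 0 == 1)) := by
  induction ks with
  | nil => intro d j _ _ _ _; simp
  | cons c rest ih =>
      intro d j hnd hndK hcon hj
      have hcK : c ∈ d.keys := (PySem.Dict.contains_iff_mem_keys _ _).mp (hcon c (by simp))
      have hndr : rest.Nodup := hnd.of_cons
      have hcr : c ∉ rest := by
        have := List.nodup_cons.mp hnd; exact this.1
      simp only [List.foldl_cons]
      by_cases hb : d.getD c 0 = 1 ∧ j > 0
      · -- promotion step
        obtain ⟨hv, hjpos⟩ := hb
        have hd2 : d.insert c (d.getD c 0 + 1) = d.insert c 2 := by rw [hv]; norm_num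
        have hstep : pvStepA (d, j) c = (d.insert c 2, j - 1) := by
          simp [pvStepA, hv, hjpos, hd2]
        rw [hstep]
        have hkeys : (d.insert c (2 : Int)).keys = d.keys :=
          PySem.Dict.keys_insert_of_contains d _ (hcon c (by simp))
        have hcon' : ∀ x ∈ rest, (d.insert c (2 : Int)).contains x = true := by
          intro x hx
          rw [PySem.Dict.contains_insert]
          simp [hcon x (by simp [hx])]
        obtain ⟨ik, i2, i1⟩ := ih (d.insert c 2) (j - 1) hndr (hkeys ▸ hndK) hcon' (by omega)
        have hA2 := pv_countP_insert d d.keys c 2 2 hndK hcK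
        have hA1 := pv_countP_insert d d.keys c 2 1 hndK hcK
        rw [hv] at hA2 hA1
        norm_num at hA2 hA1
        have hrest : rest.countP (fun x => (d.insert c (2 : Int)).getD x 0 == 1)
            = rest.countP (fun x => d.getD x 0 == 1) := by
          refine List.countP_congr ?_
          intro x hx
          have hxc : x ≠ c := by rintro rfl; exact hcr hx
          rw [PySem.Dict.getD_insert_of_ne _ _ _ hxc]
        refine ⟨by rw [ik, hkeys], ?_, ?_⟩
        · rw [i2, hkeys, hrest]
          simp only [List.countP_cons, hv]
          norm_num
          omega
        · rw [i1, hkeys, hrest]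
          simp only [List.countP_cons, hv]
          norm_num
          omega
      · -- no promotion
        have hstep : pvStepA (d, j) c = (d, j) := by simp [pvStepA, hb]
        rw [hstep]
        have ih' := ih d j hndr hndK (fun x hx => hcon x (by simp [hx])) hj
        obtain ⟨ik, i2, i1⟩ := ih'
        refine ⟨ik, ?_, ?_⟩ <;>
        · first | rw [i2] | rw [i1]
          simp only [List.countP_cons]
          by_cases hv : d.getD c 0 = 1
          · have hj0 : j = 0 := by
              rcases lt_or_eq_of_le hj with h | h
              · exact absurd ⟨hv, h⟩ hb
              · omega
            subst hj0
            simp [hv]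
          · simp [hv]

-- B's extraction loop computes the count-of-counts over the distinct characters
theorem pv_tallyB_aux : ∀ (n : Nat) (cards : List Char), cards.length ≤ n →
    pvTallyB cards
      = ((((PySem.Set.ofList cards).countP (fun x => cards.count x == 1) : Nat) : Int),
         (((PySem.Set.ofList cards).countP (fun x => cards.count x == 2) : Nat) : Int)) := by
  intro n
  induction n with
  | zero =>
      intro cards h
      have : cards = [] := List.eq_nil_of_length_eq_zero (Nat.le_zero.mp h)
      subst this
      rw [pvTallyB]; simp [PySem.Set.ofList]
  | succ n ihn =>
      intro cards hlen
      cases cards with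
      | nil => rw [pvTallyB]; simp [PySem.Set.ofList]
      | cons c rest =>
          rw [pvTallyB]
          set F := (c :: rest).filter (fun x => decide ¬(x = c)) with hFdef
          have hFr : F = rest.filter (fun x => decide ¬(x = c)) := by
            rw [hFdef]; simp
          have hFlen : F.length ≤ n := by
            rw [hFr]
            have := List.length_filter_le (fun x => decide ¬(x = c)) rest
            rw [List.length_cons] at hlen
            omega
          have ihF := ihn F hFlen
          have hcF : c ∉ PySem.Set.ofList F := by
            rw [PySem.Set.mem_ofList]
            intro h
            have := List.of_mem_filter h
            simp at this
          have hnd1 : (c :: PySem.Set.ofList F).Nodup :=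
            List.nodup_cons.mpr ⟨hcF, PySem.Set.nodup_ofList F⟩
          have hperm : (PySem.Set.ofList (c :: rest)).Perm (c :: PySem.Set.ofList F) := by
            rw [List.perm_ext_iff_of_nodup (PySem.Set.nodup_ofList _) hnd1]
            intro x
            simp only [PySem.Set.mem_ofList, hFdef, List.mem_cons, List.mem_filter,
              decide_eq_true_eq]
            by_cases hx : x = c <;> simp [hx]
          have hcnt : ∀ x ∈ PySem.Set.ofList F, (c :: rest).count x = F.count x := by
            intro x hx
            have hxF : x ∈ F := (PySem.Set.mem_ofList F x).mp hx
            have hxc : ¬ (x = c) := by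
              have := List.of_mem_filter hxF; simpa using this
            rw [hFdef, List.count_filter (by simpa using hxc)]
          have hcount : ∀ q : Nat,
              (PySem.Set.ofList (c :: rest)).countP (fun x => (c :: rest).count x == q)
                = (if (c :: rest).count c = q then 1 else 0)
                  + (PySem.Set.ofList F).countP (fun x => F.count x == q) := by
            intro q
            rw [hperm.countP_eq]
            rw [List.countP_cons]
            have he : (PySem.Set.ofList F).countP (fun x => (c :: rest).count x == q)
                = (PySem.Set.ofList F).countP (fun x => F.count x == q) := by
              refine List.countP_congr ?_
              intro x hx
              rw [hcnt x hx]
            rw [he]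
            simp only [beq_iff_eq]
            omega
          rw [ihF]
          simp only
          rw [hcount 1, hcount 2]
          split_ifs with h1 h2 <;>
            (simp only [Prod.mk.injEq] <;> constructor <;> push_cast <;> omega)

theorem pv_tallyB_eq (cards : List Char) :
    pvTallyB cards
      = ((((PySem.Set.ofList cards).countP (fun x => cards.count x == 1) : Nat) : Int),
         (((PySem.Set.ofList cards).countP (fun x => cards.count x == 2) : Nat) : Int)) :=
  pv_tallyB_aux cards.length cards le_rfl


-- ===== VERDICT (by name: the statement is the Claim_ definition above) =====
theorem is_oneP_spec : Claim_equal_is_oneP := by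
  intro line _
  unfold Spec_is_oneP is_oneP is_oneP_alt
  dsimp only
  set cs := line.toList with hcs
  -- the first loop is the standard counting loop over the non-'J' characters
  set l := cs.filter (fun c => decide ¬(c = 'J')) with hl
  have hfold :
      (cs.foldl (fun d c =>
        if c ≠ 'J' then
          (if d.contains c then d.insert c (d.getD c 0 + 1) else d.insert c 1)
        else d) (PySem.Dict.empty : PySem.Dict Char Int))
      = l.foldl (fun d x => d.insert x (d.getD x 0 + 1)) PySem.Dict.empty := by
    simp only [ne_eq]
    rw [PySem.List.foldl_ite_eq_foldl_filter (p := fun c => ¬(c = 'J'))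
      (f := fun (d : PySem.Dict Char Int) (c : Char) =>
        if d.contains c then d.insert c (d.getD c 0 + 1) else d.insert c 1)]
    rw [← hl]
    refine PySem.List.foldl_congr_mem _ _ _ _ ?_
    intro d x _
    by_cases h : d.contains x
    · simp [h]
    · have : d.getD x 0 = 0 :=
        PySem.Dict.getD_of_not_contains d 0 (by simpa using h)
      simp [h, this]
  rw [hfold]
  set d0 := l.foldl (fun d x => d.insert x (d.getD x 0 + 1)) (PySem.Dict.empty : PySem.Dict Char Int) with hd0
  have hkeys : d0.keys = PySem.Set.ofList l := by
    rw [hd0, PySem.Dict.keys_foldl_insert]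
    rfl
  have hnodK : d0.keys.Nodup := by rw [hkeys]; exact PySem.Set.nodup_ofList l
  have hgetD : ∀ v, d0.getD v 0 = (l.count v : Int) := by
    intro v
    rw [hd0, PySem.Dict.getD_foldl_insert_add_one]
    simp
  have hcon : ∀ c ∈ d0.keys, d0.contains c = true := by
    intro c hc; exact (PySem.Dict.contains_iff_mem_keys _ _).mpr hc
  have hJnat : PySem.Str.count line "J" = cs.count 'J' := by
    have : "J" = String.mk ['J'] := rfl
    rw [this, pv_strcount_single, hcs]
  have hj : (0 : Int) ≤ (PySem.Str.count line "J" : Int) := by positivity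
  have hmain := pv_loopA d0.keys d0 (PySem.Str.count line "J" : Int)
    hnodK hnodK hcon hj
  obtain ⟨hk, h2, h1⟩ := hmain
  -- A's result via values of the final dict
  set st := d0.keys.foldl pvStepA (d0, (PySem.Str.count line "J" : Int)) with hst
  have hndst : st.1.keys.Nodup := by rw [hk]; exact hnodK
  have hvals : st.1.values = st.1.keys.map (fun k => st.1.getD k 0) :=
    PySem.Dict.values_eq_map_keys st.1 hndst 0
  have hcount2 : st.1.values.count 2 = st.1.keys.countP (fun c => st.1.getD c 0 == 2) := by
    rw [hvals, List.count_eq_countP, List.countP_map]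
    refine List.countP_congr ?_
    intro x _
    simp only [Function.comp_apply, beq_iff_eq]
  have hcount1 : st.1.values.count 1 = st.1.keys.countP (fun c => st.1.getD c 0 == 1) := by
    rw [hvals, List.count_eq_countP, List.countP_map]
    refine List.countP_congr ?_
    intro x _
    simp only [Function.comp_apply, beq_iff_eq]
  -- A's countP over the dict keys is the count-of-counts over the non-'J' characters
  have e2 : d0.keys.countP (fun c => d0.getD c 0 == 2)
      = (PySem.Set.ofList l).countP (fun x => l.count x == 2) := by
    rw [hkeys]
    refine List.countP_congr ?_
    intro x _
    rw [hgetD x]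
    rcases Bool.eq_false_or_eq_true (l.count x == 2) with h | h <;> simp_all <;> omega
  have e1 : d0.keys.countP (fun c => d0.getD c 0 == 1)
      = (PySem.Set.ofList l).countP (fun x => l.count x == 1) := by
    rw [hkeys]
    refine List.countP_congr ?_
    intro x _
    rw [hgetD x]
    rcases Bool.eq_false_or_eq_true (l.count x == 1) with h | h <;> simp_all
  -- B's side
  rw [pv_tallyB_eq]
  -- jokers = count of 'J'
  have hlenl : l.length = cs.countP (fun c => decide ¬(c = 'J')) := by
    rw [hl]
    exact Eq.symm List.countP_eq_length_filter
  have hcntJ : cs.count 'J' = cs.countP (fun c => c == 'J') := List.count_eq_countP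
  have hsum : cs.countP (fun c => c == 'J') + cs.countP (fun c => decide ¬(c = 'J')) = cs.length := by
    rw [List.length_eq_countP_add_countP (l := cs) (p := fun c => c == 'J')]
    congr 1
    refine List.countP_congr ?_
    intro x _
    simp
  have hlen : PySem.Str.len line = (cs.length : Int) := by
    rw [PySem.Str.len_eq]
  -- close the Bool equality arithmetically
  rw [hcount2, hcount1, h2, h1, e2, e1, hlen, hJnat]
  set S := (PySem.Set.ofList l).countP (fun x => l.count x == 1) with hS
  set P := (PySem.Set.ofList l).countP (fun x => l.count x == 2) with hP
  rw [Bool.eq_iff_iff]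
  simp only [Bool.and_eq_true, Bool.or_eq_true, beq_iff_eq, Prod.mk.injEq, Int.toNat_natCast]
  omega
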